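-- pv_equiv track=rewrite | github.com/NASA-AMMOS/slim-cli | src/jpl/slim/best_practices/docs_website_impl/generator.py | _determine_project_type
-- ===== SOURCE A (Python) =====
-- from typing import Dict, List, Optional, Tuple
--
-- def _determine_project_type(repo_info: Dict) -> str:
--     """Determine the type of project based on repository analysis."""
--     languages = repo_info.get('languages', [])
--     files = repo_info.get('files', [])
--
--     # Check for specific project types
--     if any('package.json' in f for f in files):
--         if any('react' in f.lower() for f in files):
--             return "React web application"
--         elif any('vue' in f.lower() for f in files):
--             return "Vue.js web application"
--         else:
--             return "Node.js application"
--
--     if any('setup.py' in f or 'pyproject.toml' in f for f in files):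
--         if any('fastapi' in f.lower() or 'flask' in f.lower() for f in files):
--             return "Python web API"
--         elif any('cli' in f.lower() or 'main.py' in f for f in files):
--             return "Python CLI tool"
--         else:
--             return "Python library"
--
--     if any('pom.xml' in f or 'build.gradle' in f for f in files):
--         return "Java application"
--
--     if any('Cargo.toml' in f for f in files):
--         return "Rust application"
--
--     if any('go.mod' in f for f in files):
--         return "Go application"
--
--     # Default based on primary language
--     if 'JavaScript' in languages:
--         return "JavaScript application"
--     elif 'Python' in languages:
--         return "Python project"
--     elif 'Java' in languages:
--         return "Java project"
--     else:
--         return "software project"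
-- ===== SOURCE B (Python) =====
-- def _determine_project_type(repo_info):
--     """Single pass over files collecting presence flags, then a flag-only decision tree."""
--     languages = repo_info.get('languages', [])
--     files = repo_info.get('files', [])
--
--     pkg = react = vue = pysetup = webapi = cli = java = cargo = gomod = False
--     for f in files:
--         fl = f.lower()
--         pkg = pkg or 'package.json' in f
--         react = react or 'react' in fl
--         vue = vue or 'vue' in fl
--         pysetup = pysetup or 'setup.py' in f or 'pyproject.toml' in f
--         webapi = webapi or 'fastapi' in fl or 'flask' in fl
--         cli = cli or 'cli' in fl or 'main.py' in f
--         java = java or 'pom.xml' in f or 'build.gradle' in f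
--         cargo = cargo or 'Cargo.toml' in f
--         gomod = gomod or 'go.mod' in f
--
--     if pkg:
--         return "React web application" if react else ("Vue.js web application" if vue else "Node.js application")
--     if pysetup:
--         return "Python web API" if webapi else ("Python CLI tool" if cli else "Python library")
--     if java:
--         return "Java application"
--     if cargo:
--         return "Rust application"
--     if gomod:
--         return "Go application"
--     if 'JavaScript' in languages:
--         return "JavaScript application"
--     if 'Python' in languages:
--         return "Python project"
--     if 'Java' in languages:
--         return "Java project"
--     return "software project"
-- ===== Notes on version B (the rewrite author's own statement) =====
-- stated objective: simpler
-- what changed: B replaces A's nine separate any(...) scans of files with a single pass that accumulates boolean presence flags (computing each file's .lower() once), followed by a flag-only decision tree in the same precedence order.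
import Mathlib
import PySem

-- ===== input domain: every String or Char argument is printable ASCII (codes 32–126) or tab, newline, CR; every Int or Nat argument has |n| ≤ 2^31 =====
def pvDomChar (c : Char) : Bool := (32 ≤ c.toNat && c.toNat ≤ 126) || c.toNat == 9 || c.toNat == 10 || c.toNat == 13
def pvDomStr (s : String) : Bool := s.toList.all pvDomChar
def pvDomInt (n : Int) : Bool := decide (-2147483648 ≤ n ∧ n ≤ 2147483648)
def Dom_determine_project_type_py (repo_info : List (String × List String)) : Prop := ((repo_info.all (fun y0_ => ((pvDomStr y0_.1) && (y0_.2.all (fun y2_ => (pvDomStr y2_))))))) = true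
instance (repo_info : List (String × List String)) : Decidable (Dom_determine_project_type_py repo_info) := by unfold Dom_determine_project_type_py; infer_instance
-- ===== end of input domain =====

-- B replaces A's nine separate any(...) scans of files with one accumulating pass and a flag-only decision tree (same precedence order).

-- ===== PORT A =====
def determine_project_type_py (repo_info : List (String × List String)) : String :=
  let languages := (PySem.Dict.mk repo_info).getD "languages" []
  let files := (PySem.Dict.mk repo_info).getD "files" []
  if files.any (fun f => PySem.Str.isIn "package.json" f) then
    if files.any (fun f => PySem.Str.isIn "react" (PySem.Str.lower f)) then "React web application"
    else if files.any (fun f => PySem.Str.isIn "vue" (PySem.Str.lower f)) then "Vue.js web application"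
    else "Node.js application"
  else if files.any (fun f => PySem.Str.isIn "setup.py" f || PySem.Str.isIn "pyproject.toml" f) then
    if files.any (fun f => PySem.Str.isIn "fastapi" (PySem.Str.lower f) || PySem.Str.isIn "flask" (PySem.Str.lower f)) then "Python web API"
    else if files.any (fun f => PySem.Str.isIn "cli" (PySem.Str.lower f) || PySem.Str.isIn "main.py" f) then "Python CLI tool"
    else "Python library"
  else if files.any (fun f => PySem.Str.isIn "pom.xml" f || PySem.Str.isIn "build.gradle" f) then "Java application"
  else if files.any (fun f => PySem.Str.isIn "Cargo.toml" f) then "Rust application"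
  else if files.any (fun f => PySem.Str.isIn "go.mod" f) then "Go application"
  else if languages.contains "JavaScript" then "JavaScript application"
  else if languages.contains "Python" then "Python project"
  else if languages.contains "Java" then "Java project"
  else "software project"

-- ===== PORT B =====
structure PvFlags where
  pkg : Bool
  react : Bool
  vue : Bool
  pysetup : Bool
  webapi : Bool
  cli : Bool
  java : Bool
  cargo : Bool
  gomod : Bool
deriving DecidableEq, Repr

def pvStep (s : PvFlags) (f : String) : PvFlags :=
  let fl := PySem.Str.lower f
  { pkg := s.pkg || PySem.Str.isIn "package.json" f
  , react := s.react || PySem.Str.isIn "react" fl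
  , vue := s.vue || PySem.Str.isIn "vue" fl
  , pysetup := s.pysetup || PySem.Str.isIn "setup.py" f || PySem.Str.isIn "pyproject.toml" f
  , webapi := s.webapi || PySem.Str.isIn "fastapi" fl || PySem.Str.isIn "flask" fl
  , cli := s.cli || PySem.Str.isIn "cli" fl || PySem.Str.isIn "main.py" f
  , java := s.java || PySem.Str.isIn "pom.xml" f || PySem.Str.isIn "build.gradle" f
  , cargo := s.cargo || PySem.Str.isIn "Cargo.toml" f
  , gomod := s.gomod || PySem.Str.isIn "go.mod" f }

def determine_project_type_py_alt (repo_info : List (String × List String)) : String :=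
  let languages := (PySem.Dict.mk repo_info).getD "languages" []
  let files := (PySem.Dict.mk repo_info).getD "files" []
  let s := files.foldl pvStep ⟨false, false, false, false, false, false, false, false, false⟩
  if s.pkg then
    if s.react then "React web application"
    else if s.vue then "Vue.js web application"
    else "Node.js application"
  else if s.pysetup then
    if s.webapi then "Python web API"
    else if s.cli then "Python CLI tool"
    else "Python library"
  else if s.java then "Java application"
  else if s.cargo then "Rust application"
  else if s.gomod then "Go application"
  else if languages.contains "JavaScript" then "JavaScript application"
  else if languages.contains "Python" then "Python project"
  else if languages.contains "Java" then "Java project"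
  else "software project"

-- ===== PRECONDITION & SPEC =====
def Spec_determine_project_type_py (repo_info : List (String × List String)) (out : String) : Prop := out = determine_project_type_py_alt repo_info
instance (repo_info : List (String × List String)) (out : String) : Decidable (Spec_determine_project_type_py repo_info out) := by unfold Spec_determine_project_type_py; infer_instance

-- ===== CLAIM (what is proved, stated in full; the proofs are below) =====
def Claim_equal_determine_project_type_py : Prop := ∀ (repo_info : List (String × List String)), Dom_determine_project_type_py repo_info → Spec_determine_project_type_py repo_info (determine_project_type_py repo_info)

-- ===== LEMMAS AND PROOFS =====

/-- The single flag-accumulating pass computes exactly the nine `any` scans. -/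
theorem pvStep_foldl (files : List String) (s : PvFlags) :
    files.foldl pvStep s =
      ⟨ s.pkg || files.any (fun f => PySem.Str.isIn "package.json" f)
      , s.react || files.any (fun f => PySem.Str.isIn "react" (PySem.Str.lower f))
      , s.vue || files.any (fun f => PySem.Str.isIn "vue" (PySem.Str.lower f))
      , s.pysetup || files.any (fun f => PySem.Str.isIn "setup.py" f || PySem.Str.isIn "pyproject.toml" f)
      , s.webapi || files.any (fun f => PySem.Str.isIn "fastapi" (PySem.Str.lower f) || PySem.Str.isIn "flask" (PySem.Str.lower f))
      , s.cli || files.any (fun f => PySem.Str.isIn "cli" (PySem.Str.lower f) || PySem.Str.isIn "main.py" f)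
      , s.java || files.any (fun f => PySem.Str.isIn "pom.xml" f || PySem.Str.isIn "build.gradle" f)
      , s.cargo || files.any (fun f => PySem.Str.isIn "Cargo.toml" f)
      , s.gomod || files.any (fun f => PySem.Str.isIn "go.mod" f) ⟩ := by
  induction files generalizing s with
  | nil => simp
  | cons f t ih => simp [pvStep, ih, Bool.or_assoc]

-- ===== VERDICT (by name: the statement is the Claim_ definition above) =====
theorem determine_project_type_py_spec : Claim_equal_determine_project_type_py := by
  intro repo_info _
  unfold Spec_determine_project_type_py determine_project_type_py determine_project_type_py_alt
  simp only [pvStep_foldl]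
  simp
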